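-- pv_equiv track=rewrite | github.com/Leiafan/olympic-tasks | task_2.2.py | last_dig
-- ===== SOURCE A (Python) =====
-- def last_dig(x):
--     result = 1
--     for i in range(2, x+1):
--         j = i
-- #        while j % 2 == 0:
-- #            j //= 2
-- #        while j % 5 == 0:
-- #            j //= 5
--         while j % 10 == 0:
--             j //= 10
--         result = result*j
--     return result % 10
-- ===== SOURCE B (Python) =====
-- def last_dig(x):
--     # Closed form: for x >= 5 the product contains factors 2 and 5 (neither
--     # has trailing zeros, so they are not stripped), hence it is divisible by
--     # 10 and the answer is 0; the handful of smaller cases are fixed values.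
--     if x >= 5:
--         return 0
--     if x == 2:
--         return 2
--     if x == 3:
--         return 6
--     if x == 4:
--         return 4
--     return 1
-- ===== Notes on version B (the rewrite author's own statement) =====
-- stated objective: faster
-- what changed: B replaces the whole product loop by an O(1) closed form: for x >= 5 the product contains the unstripped factors 2 and 5, so it is divisible by 10 and the last digit is 0; the four small cases are literal constants.
import Mathlib
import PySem

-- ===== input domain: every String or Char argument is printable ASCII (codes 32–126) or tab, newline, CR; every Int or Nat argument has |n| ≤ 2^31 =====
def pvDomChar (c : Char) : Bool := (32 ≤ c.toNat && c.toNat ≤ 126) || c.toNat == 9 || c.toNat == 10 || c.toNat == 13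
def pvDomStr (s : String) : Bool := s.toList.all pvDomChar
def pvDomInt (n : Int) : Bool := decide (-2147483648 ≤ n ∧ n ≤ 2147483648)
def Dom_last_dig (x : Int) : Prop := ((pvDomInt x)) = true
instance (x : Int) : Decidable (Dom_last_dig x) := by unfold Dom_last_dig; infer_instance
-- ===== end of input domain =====

-- B replaces A's product loop by an O(1) closed form (for x ≥ 5 the product contains factors 2 and 5, so its last digit is 0); same return value.

-- ===== PORT A =====
-- inner 'while j % 10 == 0: j //= 10'; the 'j ≠ 0' guard only makes the recursion total (Python loops forever at 0; never reached, loop variable i ≥ 2)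
def stripA (j : Int) : Int :=
  if h : j ≠ 0 ∧ PySem.Int.mod j 10 = 0 then stripA (PySem.Int.floordiv j 10) else j
termination_by j.natAbs
decreasing_by
  obtain ⟨hj, hm⟩ := h
  rw [PySem.Int.mod_eq_emod_of_pos (by norm_num : (0:Int) < 10)] at hm
  obtain ⟨k, hk⟩ := Int.dvd_of_emod_eq_zero hm
  rw [PySem.Int.floordiv_eq_ediv_of_pos (by norm_num : (0:Int) < 10)]
  subst hk
  rw [Int.mul_ediv_cancel_left _ (by norm_num : (10:Int) ≠ 0)]
  have hk0 : k ≠ 0 := by rintro rfl; simp at hj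
  have : (10 * k).natAbs = 10 * k.natAbs := by
    simp [Int.natAbs_mul]
  omega

def last_dig (x : Int) : Int :=
  PySem.Int.mod
    ((PySem.List.pyRange 2 (x + 1) 1).foldl (fun result i => result * stripA i) 1) 10

-- ===== PORT B =====
def last_dig_alt (x : Int) : Int :=
  if x ≥ 5 then 0
  else if x = 2 then 2
  else if x = 3 then 6
  else if x = 4 then 4
  else 1

-- ===== PRECONDITION & SPEC =====
def Spec_last_dig (x : Int) (out : Int) : Prop := out = last_dig_alt x
instance (x : Int) (out : Int) : Decidable (Spec_last_dig x out) := by unfold Spec_last_dig; infer_instance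

-- ===== CLAIM (what is proved, stated in full; the proofs are below) =====
def Claim_equal_last_dig : Prop := ∀ (x : Int), Dom_last_dig x → Spec_last_dig x (last_dig x)

-- ===== LEMMAS AND PROOFS =====

lemma stripA_self (j : Int) (h : PySem.Int.mod j 10 ≠ 0) : stripA j = j := by
  rw [stripA, dif_neg]
  rintro ⟨-, hm⟩
  exact h hm

lemma foldl_mul (l : List Int) :
    ∀ r : Int, l.foldl (fun result i => result * stripA i) r = r * (l.map stripA).prod := by
  induction l with
  | nil => intro r; simp
  | cons i t ih =>
    intro r
    simp only [List.foldl_cons, List.map_cons, List.prod_cons, ih, mul_assoc]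

lemma mod_small (j : Int) (h1 : 0 ≤ j) (h2 : j < 10) : PySem.Int.mod j 10 = j := by
  rw [PySem.Int.mod_eq_emod_of_pos (by norm_num : (0:Int) < 10)]
  omega

-- ===== VERDICT (by name: the statement is the Claim_ definition above) =====
theorem last_dig_spec : Claim_equal_last_dig := by
  intro x _
  unfold Spec_last_dig last_dig last_dig_alt
  have s2 : stripA 2 = 2 := stripA_self 2 (by decide)
  have s3 : stripA 3 = 3 := stripA_self 3 (by decide)
  have s4 : stripA 4 = 4 := stripA_self 4 (by decide)
  have s5 : stripA 5 = 5 := stripA_self 5 (by decide)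
  by_cases h5 : x ≥ 5
  · -- the range starts 2, 3, 4, 5, …; the product is 120 * (rest), last digit 0
    rw [PySem.List.pyRange_one_cons (by omega : (2:Int) < x + 1),
        show (2:Int) + 1 = 3 from by norm_num,
        PySem.List.pyRange_one_cons (by omega : (3:Int) < x + 1),
        show (3:Int) + 1 = 4 from by norm_num,
        PySem.List.pyRange_one_cons (by omega : (4:Int) < x + 1),
        show (4:Int) + 1 = 5 from by norm_num,
        PySem.List.pyRange_one_cons (by omega : (5:Int) < x + 1),
        show (5:Int) + 1 = 6 from by norm_num,
        foldl_mul]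
    simp only [List.map_cons, List.prod_cons, s2, s3, s4, s5]
    rw [if_pos h5, PySem.Int.mod_eq_emod_of_pos (by norm_num : (0:Int) < 10)]
    have : (1 : Int) * (2 * (3 * (4 * (5 * ((PySem.List.pyRange 6 (x + 1) 1).map stripA).prod))))
        = 10 * (12 * ((PySem.List.pyRange 6 (x + 1) 1).map stripA).prod) := by ring
    rw [this, Int.mul_emod_right]
  · rw [if_neg h5]
    by_cases h2 : x = 2
    · subst h2
      rw [show (2:Int) + 1 = 1 + 1 + 1 by ring, PySem.List.pyRange_one_succ_right (by norm_num),
        PySem.List.pyRange_one_eq_nil (by norm_num)]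
      simp only [List.foldl_append, List.foldl_cons, List.foldl_nil, one_mul]
      norm_num
      rw [s2]
      decide
    · by_cases h3 : x = 3
      · subst h3
        rw [show (3:Int) + 1 = 2 + 1 + 1 by ring, PySem.List.pyRange_one_succ_right (by norm_num),
          show (2:Int) + 1 = 1 + 1 + 1 by ring, PySem.List.pyRange_one_succ_right (by norm_num),
          PySem.List.pyRange_one_eq_nil (by norm_num)]
        simp only [List.foldl_append, List.foldl_cons, List.foldl_nil, one_mul]
        norm_num
        rw [s2, s3]
        decide
      · by_cases h4 : x = 4
        · subst h4
          rw [show (4:Int) + 1 = 3 + 1 + 1 by ring, PySem.List.pyRange_one_succ_right (by norm_num),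
            show (3:Int) + 1 = 2 + 1 + 1 by ring, PySem.List.pyRange_one_succ_right (by norm_num),
            show (2:Int) + 1 = 1 + 1 + 1 by ring, PySem.List.pyRange_one_succ_right (by norm_num),
            PySem.List.pyRange_one_eq_nil (by norm_num)]
          simp only [List.foldl_append, List.foldl_cons, List.foldl_nil, one_mul]
          norm_num
          rw [s2, s3, s4]
          decide
        · -- x ≤ 1: empty range, result 1
          rw [PySem.List.pyRange_one_eq_nil (by omega : x + 1 ≤ 2)]
          rw [List.foldl_nil, if_neg h2, if_neg h3, if_neg h4,
            mod_small 1 (by norm_num) (by norm_num)]
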